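-- pv_equiv track=rewrite | github.com/phoughton/piglatin | example.py | first_consonant_clust
-- ===== SOURCE A (Python) =====
-- vowels = ['a', 'e', 'i', 'o', 'u']
--
-- def first_consonant_clust(text):
--     index = 0
--
--     while text[index: index+1].lower() not in vowels:
--         if text[index: index+1].lower().isalpha():
--             index += 1
--         else:
--             return -1
--
--     return index
-- ===== SOURCE B (Python) =====
-- vowels = ['a', 'e', 'i', 'o', 'u']
--
-- def first_consonant_clust(text):
--     # Find the position of the earliest vowel via one str.find per vowel,
--     # then validate that everything before it is alphabetic.
--     low = text.lower()
--     hits = [h for h in (low.find(v) for v in vowels) if h != -1]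
--     if not hits:
--         return -1
--     fv = min(hits)
--     return fv if all(c.isalpha() for c in low[:fv]) else -1
-- ===== Notes on version B (the rewrite author's own statement) =====
-- stated objective: faster
-- what changed: B replaces A's left-to-right walk (advance past consonant letters, return -1 from inside the loop) with a search-then-validate algorithm: one str.find per vowel on the lowered string gives the earliest vowel position fv, and the answer is fv if the prefix before it is all-alphabetic, else -1.
import Mathlib
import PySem

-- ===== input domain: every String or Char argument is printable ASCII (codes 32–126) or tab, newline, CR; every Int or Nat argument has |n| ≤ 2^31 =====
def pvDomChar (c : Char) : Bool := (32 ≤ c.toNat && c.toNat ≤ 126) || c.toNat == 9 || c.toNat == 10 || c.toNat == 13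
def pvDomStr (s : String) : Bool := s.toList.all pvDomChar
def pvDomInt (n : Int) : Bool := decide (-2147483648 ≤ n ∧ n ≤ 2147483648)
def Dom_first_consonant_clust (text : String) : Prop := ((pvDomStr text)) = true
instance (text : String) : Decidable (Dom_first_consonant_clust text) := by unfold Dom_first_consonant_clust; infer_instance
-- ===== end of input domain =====

-- B replaces A's sequential walk with a search-then-validate algorithm: one str.find per vowel
-- gives the earliest vowel position, then the prefix before it is checked to be all-alphabetic.

def pvVowels : List Char := ['a', 'e', 'i', 'o', 'u']

-- ===== PORT A =====
-- A's while-loop: text[index:index+1] is the single char at index (or '' at the end, where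
-- ''.lower() is not in vowels and ''.isalpha() is False, hence the [] => -1 case).
def firstCCgoA : List Char → Int → Int
  | [], _ => -1
  | c :: rest, index =>
    if decide (PySem.Chars.lowerChar c ∈ pvVowels) then index
    else if PySem.Chars.isalpha (PySem.Chars.lowerChar c) then firstCCgoA rest (index + 1)
    else -1

def first_consonant_clust (text : String) : Int := firstCCgoA text.toList 0

-- ===== PORT B =====
-- Source B: low = text.lower(); hits = [h for h in (low.find(v) for v in vowels) if h != -1];
--       if not hits: return -1; fv = min(hits); return fv if all alpha in low[:fv] else -1
def first_consonant_clust_alt (text : String) : Int :=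
  let low := PySem.Chars.lower text.toList
  let hits := (pvVowels.map (fun v => PySem.Chars.find low [v])).filter (fun h => h != -1)
  match PySem.List.min? hits (fun x => x) with
  | none => -1
  | some fv =>
    if (PySem.List.slice low none (some fv)).all PySem.Chars.isalpha then fv else -1

-- ===== PRECONDITION & SPEC =====
def Spec_first_consonant_clust (text : String) (out : Int) : Prop := out = first_consonant_clust_alt text
instance (text : String) (out : Int) : Decidable (Spec_first_consonant_clust text out) := by unfold Spec_first_consonant_clust; infer_instance

-- ===== CLAIM (what is proved, stated in full; the proofs are below) =====
def Claim_equal_first_consonant_clust : Prop := ∀ (text : String), Dom_first_consonant_clust text → Spec_first_consonant_clust text (first_consonant_clust text)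

-- ===== LEMMAS AND PROOFS =====

-- the consonant test of A's loop, as a predicate on the original character
def pvConsB (c : Char) : Bool := PySem.Chars.isalpha c && !(decide (PySem.Chars.lowerChar c ∈ pvVowels))

-- Python's c.lower().isalpha() agrees with c.isalpha() (lowering only moves A–Z to a–z).
theorem pv_isalpha_lower (c : Char) : PySem.Chars.isalpha (PySem.Chars.lowerChar c) = PySem.Chars.isalpha c := by
  simp only [PySem.Chars.isalpha, PySem.Chars.lowerChar, PySem.Chars.isupper, PySem.Chars.islower,
    Char.le_def]
  split_ifs with h
  · simp only [Bool.and_eq_true, decide_eq_true_eq, UInt32.le_iff_toNat_le] at h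
    obtain ⟨h1, h2⟩ := h
    have h1' : 65 ≤ c.toNat := by simpa using h1
    have h2' : c.toNat ≤ 90 := by simpa using h2
    have hv : (Char.ofNat (c.toNat + 32)).toNat = c.toNat + 32 := by
      rw [Char.ofNat, dif_pos]
      · rfl
      · simp [Nat.isValidChar]; omega
    simp only [UInt32.le_iff_toNat_le]
    have hA : ('A').val.toNat = 65 := rfl
    have hZ : ('Z').val.toNat = 90 := rfl
    have ha : ('a').val.toNat = 97 := rfl
    have hz : ('z').val.toNat = 122 := rfl
    have hc : (Char.ofNat (c.toNat + 32)).val.toNat = c.toNat + 32 := hv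
    have hc' : c.val.toNat = c.toNat := rfl
    rw [hA, hZ, ha, hz, hc, hc']
    have e1 : ¬ (c.toNat + 32 ≤ 90) := by omega
    have e2 : (65 : Nat) ≤ c.toNat + 32 := by omega
    have e3 : (97 : Nat) ≤ c.toNat + 32 := by omega
    have e4 : c.toNat + 32 ≤ 122 := by omega
    have e5 : ¬ (97 ≤ c.toNat) := by omega
    simp [h1', h2', e1, e2, e3, e4, e5]
  · rfl

-- A's loop computed as: measure the pvConsB-prefix, then look at the stop character.
theorem firstCCgoA_eq (l : List Char) (i : Int) :
    firstCCgoA l i =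
      (match l.drop (l.takeWhile pvConsB).length with
       | c :: _ => if decide (PySem.Chars.lowerChar c ∈ pvVowels) then ((l.takeWhile pvConsB).length : Int) + i else -1
       | [] => -1) := by
  induction l generalizing i with
  | nil => simp [firstCCgoA]
  | cons c rest ih =>
    by_cases hv : decide (PySem.Chars.lowerChar c ∈ pvVowels) = true
    · have hp : pvConsB c = false := by simp [pvConsB, hv]
      simp [firstCCgoA, hv, hp]
    · by_cases ha : PySem.Chars.isalpha (PySem.Chars.lowerChar c) = true
      · have hp : pvConsB c = true := by
          simp [pvConsB, pv_isalpha_lower c ▸ ha]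
          simpa using hv
        have : firstCCgoA (c :: rest) i = firstCCgoA rest (i + 1) := by
          simp [firstCCgoA, hv, ha]
        rw [this, ih (i + 1)]
        simp only [List.takeWhile_cons, hp, if_true, List.length_cons, List.drop_succ_cons]
        cases rest.drop (rest.takeWhile pvConsB).length with
        | nil => rfl
        | cons d _ =>
          by_cases hd : decide (PySem.Chars.lowerChar d ∈ pvVowels) = true
          · simp [hd]; ring
          · simp [hd]
      · have hp : pvConsB c = false := by
          simp [pvConsB]
          intro halpha
          rw [← pv_isalpha_lower] at halpha
          exact absurd halpha (by simpa using ha)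
        simp [firstCCgoA, hv, ha, hp]

-- [v] is a prefix of xs iff xs starts with v
theorem pv_singleton_prefix_iff (v : Char) (xs : List Char) : ([v] <+: xs) ↔ xs.head? = some v := by
  cases xs <;> simp [List.prefix_cons_iff, eq_comm]

-- [v] is an infix of m iff v is an element of m
theorem pv_singleton_infix_iff_mem (v : Char) (m : List Char) : ([v] <:+: m) ↔ v ∈ m := by
  constructor
  · intro h
    exact h.subset (by simp)
  · intro h
    obtain ⟨s, t, rfl⟩ := List.append_of_mem h
    exact ⟨s, t, by simp⟩

-- when find m [v] succeeds, it points exactly at the first occurrence of v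
theorem pv_find_char (m : List Char) (v : Char) (h : PySem.Chars.find m [v] ≠ -1) :
    (PySem.Chars.find m [v]).toNat < m.length ∧
    m[(PySem.Chars.find m [v]).toNat]! = v ∧
    ∀ i < (PySem.Chars.find m [v]).toNat, m[i]! ≠ v := by
  have h0 : 0 ≤ PySem.Chars.find m [v] := by
    have := PySem.Chars.neg_one_le_find (s := m) (sub := [v])
    omega
  obtain ⟨h1, h2⟩ := PySem.Chars.find_spec (s := m) (sub := [v]) h0
  rw [pv_singleton_prefix_iff] at h1
  rw [List.head?_drop] at h1
  have hlt : (PySem.Chars.find m [v]).toNat < m.length := by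
    by_contra hge
    rw [List.getElem?_eq_none (by omega)] at h1
    simp at h1
  refine ⟨hlt, ?_, ?_⟩
  · rw [List.getElem?_eq_getElem hlt] at h1
    simp [List.getElem!_eq_getElem?_getD, List.getElem?_eq_getElem hlt]
    exact Option.some.inj h1
  · intro i hi
    have := h2 i hi
    rw [pv_singleton_prefix_iff, List.head?_drop] at this
    intro heq
    apply this
    have hil : i < m.length := by omega
    rw [List.getElem!_eq_getElem?_getD, List.getElem?_eq_getElem hil] at heq
    rw [List.getElem?_eq_getElem hil]
    simpa using heq

-- the character at which takeWhile stops fails the predicate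
theorem pv_takeWhile_stop {p : Char → Bool} (l : List Char) (h : (l.takeWhile p).length < l.length) :
    p (l[(l.takeWhile p).length]'h) = false := by
  induction l with
  | nil => simp at h
  | cons c rest ih =>
    by_cases hc : p c = true
    · simp only [List.takeWhile_cons, hc, if_true, List.length_cons] at h ⊢
      simpa using ih (by omega)
    · simp only [Bool.not_eq_true] at hc
      simp [hc]

-- the prefix of a takeWhile satisfies the predicate pointwise
theorem pv_takeWhile_get {p : Char → Bool} (l : List Char) (i : Nat)
    (hi : i < (l.takeWhile p).length) :
    p (l[i]'(lt_of_lt_of_le hi (List.takeWhile_prefix p).length_le)) = true := by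
  have hmem : (l.takeWhile p)[i] ∈ l.takeWhile p := List.getElem_mem hi
  have hp := List.mem_takeWhile_imp hmem
  have hpre := (List.takeWhile_prefix (l := l) p)
  rwa [hpre.getElem hi] at hp

-- hits of Source B characterised: empty when m has no vowel, min = first vowel index otherwise
theorem pv_hits_nil (m : List Char) (hno : ∀ i (h : i < m.length), m[i] ∉ pvVowels) :
    (pvVowels.map (fun v => PySem.Chars.find m [v])).filter (fun h => h != -1) = [] := by
  rw [List.filter_eq_nil_iff]
  intro a ha
  obtain ⟨v, hv, rfl⟩ := List.mem_map.mp ha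
  have : PySem.Chars.find m [v] = -1 := by
    rw [PySem.Chars.find_eq_neg_one_iff, pv_singleton_infix_iff_mem]
    intro hmem
    obtain ⟨i, hil, rfl⟩ := List.mem_iff_getElem.mp hmem
    exact hno i hil hv
  simp [this]

theorem pv_hits_min (m : List Char) (k : Nat) (hk : k < m.length)
    (hkv : m[k] ∈ pvVowels) (hno : ∀ i, i < k → m[i]! ∉ pvVowels) :
    PySem.List.min? ((pvVowels.map (fun v => PySem.Chars.find m [v])).filter (fun h => h != -1))
      (fun x => x) = some (k : Int) := by
  set hits := (pvVowels.map (fun v => PySem.Chars.find m [v])).filter (fun h => h != -1) with hhits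
  -- every element of hits is the first-occurrence index of some vowel, hence ≥ k
  have hmemspec : ∀ h ∈ hits, (k : Int) ≤ h := by
    intro h hmem
    rw [hhits, List.mem_filter] at hmem
    obtain ⟨hmap, hne⟩ := hmem
    obtain ⟨v, hv, rfl⟩ := List.mem_map.mp hmap
    have hne' : PySem.Chars.find m [v] ≠ -1 := by simpa using hne
    obtain ⟨hlt, hgetv, _⟩ := pv_find_char m v hne'
    have h0 : 0 ≤ PySem.Chars.find m [v] := by
      have := PySem.Chars.neg_one_le_find (s := m) (sub := [v])
      omega
    by_contra hlt'
    have hfk : (PySem.Chars.find m [v]).toNat < k := by omega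
    apply hno _ hfk
    rw [hgetv]; exact hv
  -- k itself is in hits: find m [m[k]] = k
  have hfindk : PySem.Chars.find m [m[k]] = (k : Int) := by
    have hne : PySem.Chars.find m [m[k]] ≠ -1 := by
      rw [ne_eq, PySem.Chars.find_eq_neg_one_iff, pv_singleton_infix_iff_mem]
      simp only [not_not, List.mem_iff_getElem]
      exact ⟨k, hk, rfl⟩
    obtain ⟨hlt, hgetv, hmin⟩ := pv_find_char m (m[k]) hne
    have h0 : 0 ≤ PySem.Chars.find m [m[k]] := by
      have := PySem.Chars.neg_one_le_find (s := m) (sub := [m[k]])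
      omega
    have hge : k ≤ (PySem.Chars.find m [m[k]]).toNat := by
      by_contra h'
      refine hno ((PySem.Chars.find m [m[k]]).toNat) (by omega) ?_
      rw [hgetv]; exact hkv
    have hle : (PySem.Chars.find m [m[k]]).toNat ≤ k := by
      by_contra h'
      have := hmin k (by omega)
      rw [List.getElem!_eq_getElem?_getD, List.getElem?_eq_getElem hk] at this
      simp at this
    omega
  have hkmem : ((k : Int)) ∈ hits := by
    rw [hhits, List.mem_filter]
    refine ⟨List.mem_map.mpr ⟨m[k], hkv, hfindk⟩, ?_⟩
    simp only [bne_iff_ne, ne_eq]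
    omega
  cases hmq : PySem.List.min? hits (fun x => x) with
  | none =>
    rw [PySem.List.min?_eq_none_iff] at hmq
    rw [hmq] at hkmem
    simp at hkmem
  | some q =>
    have hqmem := PySem.List.min?_mem hmq
    have hqmin := PySem.List.min?_isMin hmq
    have h1 := hmemspec q hqmem
    have h2 := hqmin _ hkmem
    have : q = (k : Int) := le_antisymm h2 h1
    rw [this]

-- ===== VERDICT (by name: the statement is the Claim_ definition above) =====
theorem first_consonant_clust_spec : Claim_equal_first_consonant_clust := by
  intro text _
  unfold Spec_first_consonant_clust first_consonant_clust
  rw [firstCCgoA_eq]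
  have hlow : PySem.Chars.lower text.toList = text.toList.map PySem.Chars.lowerChar := by
    simp [PySem.Chars.lower]
  simp only [first_consonant_clust_alt, hlow]
  set l := text.toList with hl
  set m := l.map PySem.Chars.lowerChar with hm
  set n := (l.takeWhile pvConsB).length with hn
  have hnle : n ≤ l.length := (List.takeWhile_prefix (l := l) pvConsB).length_le
  have hmlen : m.length = l.length := by simp [hm]
  have hmget : ∀ i (h : i < l.length), m[i]'(by omega) = PySem.Chars.lowerChar (l[i]'h) := by
    intro i h; simp [hm]
  have hconspre : ∀ i (h : i < n), pvConsB (l[i]'(by omega)) = true := fun i h => pv_takeWhile_get l i h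
  have hnovow : ∀ i, i < n → m[i]! ∉ pvVowels := by
    intro i hi
    have hil : i < l.length := by omega
    have hcp := hconspre i hi
    simp only [pvConsB, Bool.and_eq_true, Bool.not_eq_true', decide_eq_false_iff_not] at hcp
    rw [List.getElem!_eq_getElem?_getD, List.getElem?_eq_getElem (show i < m.length by omega),
      Option.getD_some, hmget i hil]
    exact hcp.2
  cases hdrop : l.drop n with
  | nil =>
    have hlen : l.length ≤ n := by
      have hd := congrArg List.length hdrop
      simp only [List.length_drop, List.length_nil] at hd
      omega
    have hall : ∀ i (h : i < m.length), m[i] ∉ pvVowels := by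
      intro i h
      have hno := hnovow i (by omega)
      rwa [List.getElem!_eq_getElem?_getD, List.getElem?_eq_getElem h, Option.getD_some] at hno
    rw [pv_hits_nil m hall]
    simp [PySem.List.min?]
  | cons c rest =>
    have hnlt : n < l.length := by
      have hd := congrArg List.length hdrop
      simp only [List.length_drop, List.length_cons] at hd
      omega
    have hc : c = l[n]'hnlt := by
      have hd := List.drop_eq_getElem_cons hnlt
      rw [hdrop] at hd
      exact (List.cons.inj hd).1
    by_cases hv : PySem.Chars.lowerChar (l[n]'hnlt) ∈ pvVowels
    · -- vowel at position n: both sides return n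
      have hkv : m[n]'(by omega) ∈ pvVowels := by rw [hmget n hnlt]; exact hv
      rw [pv_hits_min m n (by omega) hkv hnovow]
      have hall2 : ∀ x ∈ List.take n m, PySem.Chars.isalpha x = true := by
        intro x hx
        obtain ⟨i, hi, rfl⟩ := List.mem_iff_getElem.mp hx
        have hin : i < n := by
          simp only [List.length_take] at hi
          omega
        have hil : i < l.length := by omega
        rw [List.getElem_take, hmget i hil, pv_isalpha_lower]
        have hcp := hconspre i hin
        simp only [pvConsB, Bool.and_eq_true] at hcp
        exact hcp.1
      rw [hc]
      simp [hv]
      exact hall2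
    · -- the cluster stops at a non-letter (or the vowel test fails): both sides return -1
      have hstop : pvConsB (l[n]'hnlt) = false := pv_takeWhile_stop l hnlt
      have halphaF : PySem.Chars.isalpha (l[n]'hnlt) = false := by
        by_contra hT
        rw [Bool.not_eq_false] at hT
        unfold pvConsB at hstop
        rw [hT] at hstop
        simp only [Bool.true_and, Bool.not_eq_false', decide_eq_true_eq] at hstop
        exact hv hstop
      have hnovow' : ∀ i, i ≤ n → m[i]! ∉ pvVowels := by
        intro i hi
        rcases Nat.lt_or_ge i n with h' | h'
        · exact hnovow i h'
        · rw [show i = n by omega]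
          rw [List.getElem!_eq_getElem?_getD, List.getElem?_eq_getElem (show n < m.length by omega),
            Option.getD_some, hmget n hnlt]
          exact hv
      rw [hc]
      simp only [hv, decide_eq_true_eq]
      cases hmq : PySem.List.min? ((pvVowels.map (fun v => PySem.Chars.find m [v])).filter (fun h => h != -1)) (fun x => x) with
      | none => rfl
      | some fv =>
        have hqmem := PySem.List.min?_mem hmq
        rw [List.mem_filter] at hqmem
        obtain ⟨hmap, hne⟩ := hqmem
        obtain ⟨v, hvv, hfv⟩ := List.mem_map.mp hmap
        have hne' : PySem.Chars.find m [v] ≠ -1 := by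
          rw [hfv]; simpa using hne
        obtain ⟨hlt, hgetv, _⟩ := pv_find_char m v hne'
        rw [hfv] at hlt hgetv
        have h0 : 0 ≤ fv := by
          have := PySem.Chars.neg_one_le_find (s := m) (sub := [v])
          omega
        have hfvn : n < fv.toNat := by
          by_contra h'
          apply hnovow' fv.toNat (by omega)
          rw [hgetv]
          exact hvv
        have hallF : (PySem.List.slice m none (some fv)).all PySem.Chars.isalpha = false := by
          rw [PySem.List.slice_to _ h0]
          have hlen : n < (m.take fv.toNat).length := by
            simp only [List.length_take]
            omega
          rw [← Bool.not_eq_true, List.all_eq_true]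
          intro hforall
          have hmem : (m.take fv.toNat)[n]'hlen ∈ m.take fv.toNat := List.getElem_mem hlen
          have hfa := hforall _ hmem
          rw [List.getElem_take, hmget n hnlt, pv_isalpha_lower, halphaF] at hfa
          exact Bool.false_ne_true hfa
        show (-1 : Int) = if (PySem.List.slice m none (some fv)).all PySem.Chars.isalpha = true then fv else -1
        rw [hallF]
        simp
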